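-- pv_equiv track=rewrite | github.com/Barley768/50061799-ACDT-CW1 | Project/Controllers/dashboard_controller.py | holiday_frequency
-- ===== SOURCE A (Python) =====
-- def holiday_frequency(holidays: list[dict]) -> tuple[list[int], list[str], list[str]]:
--     """Takes user input, counts holidays per month and generates tooltips"""
--
--     month_counts = [0] * 12
--     month_holiday_names: list[list[str]] = [[] for _ in range(12)]
--
--     for h in holidays:
--         date_str = h.get("date", "")
--         name = h.get("localName", h.get("name", "Unnamed holiday"))
--
--         parts = date_str.split("-")
--         if len(parts) >= 2:
--             try:
--                 month_index = int(parts[1]) - 1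
--                 if 0 <= month_index < 12:
--                     month_counts[month_index] += 1
--                     month_holiday_names[month_index].append(name)
--             except ValueError:
--                 continue
--
--     month_labels = ["Jan", "Feb", "Mar", "Apr", "May", "Jun"
--                     , "Jul", "Aug", "Sep", "Oct", "Nov", "Dec"]
--
--     # Tooltip
--     month_tooltips: list[str] = []
--     for names in month_holiday_names:
--         if not names:
--             month_tooltips.append("No holidays")
--         else:
--             month_tooltips.append(", ".join(names))
--
--     return month_counts, month_labels, month_tooltips
-- ===== SOURCE B (Python) =====
-- def holiday_frequency(holidays: list[dict]) -> tuple[list[int], list[str], list[str]]: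
--     """Group holiday names by parsed month, then derive counts and tooltips together."""
--
--     def parse(h):
--         parts = h.get("date", "").split("-")
--         if len(parts) < 2:
--             return None
--         try:
--             mi = int(parts[1]) - 1
--         except ValueError:
--             return None
--         if 0 <= mi < 12:
--             return (mi, h.get("localName", h.get("name", "Unnamed holiday")))
--         return None
--
--     parsed = [p for p in (parse(h) for h in holidays) if p is not None]
--
--     month_counts = []
--     month_tooltips = []
--     for m in range(12):
--         names = [nm for mi, nm in parsed if mi == m]
--         month_counts.append(len(names))
--         month_tooltips.append("No holidays" if not names else ", ".join(names))
--
--     month_labels = ["Jan", "Feb", "Mar", "Apr", "May", "Jun",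
--                     "Jul", "Aug", "Sep", "Oct", "Nov", "Dec"]
--
--     return month_counts, month_labels, month_tooltips
-- ===== Notes on version B (the rewrite author's own statement) =====
-- stated objective: simpler
-- what changed: B replaces A's two parallel 12-slot accumulator arrays updated in place with a single parse pass producing (month, name) pairs, then a fixed 12-iteration grouping loop that derives count and tooltip together from each month's name list.
import Mathlib
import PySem

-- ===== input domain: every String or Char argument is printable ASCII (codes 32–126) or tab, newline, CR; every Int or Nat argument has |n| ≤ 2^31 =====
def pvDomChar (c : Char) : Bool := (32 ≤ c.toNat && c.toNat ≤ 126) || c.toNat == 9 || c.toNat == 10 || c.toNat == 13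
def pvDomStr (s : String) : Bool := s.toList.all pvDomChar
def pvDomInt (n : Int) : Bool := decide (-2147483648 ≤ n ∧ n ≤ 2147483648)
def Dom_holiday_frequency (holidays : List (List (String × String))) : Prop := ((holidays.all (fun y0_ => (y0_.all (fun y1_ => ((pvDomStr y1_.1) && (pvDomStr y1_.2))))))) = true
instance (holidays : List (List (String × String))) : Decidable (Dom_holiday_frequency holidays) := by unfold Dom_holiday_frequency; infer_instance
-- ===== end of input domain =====

-- B regroups the work: one parse pass to (month, name) pairs, then a 12-step grouping loop
-- deriving counts and tooltips together (objective: simpler decomposition, same cost).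

-- ===== PORT A =====
-- one holiday processed into the pair of accumulators (month_counts, month_holiday_names)
def hfA_step (st : List Int × List (List String)) (h : List (String × String)) :
    List Int × List (List String) :=
  let d := PySem.Dict.ofList h
  let date_str := PySem.Dict.getD d "date" ""
  let name := PySem.Dict.getD d "localName" (PySem.Dict.getD d "name" "Unnamed holiday")
  let parts := (PySem.Str.split? date_str "-").getD []
  if 2 ≤ parts.length then
    match PySem.Int.ofStr? (PySem.List.pyGetD parts 1 "") with
    | some v =>
        let month_index := v - 1
        if 0 ≤ month_index ∧ month_index < 12 then
          (PySem.List.pySetD st.1 month_index (PySem.List.pyGetD st.1 month_index 0 + 1),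
           PySem.List.pySetD st.2 month_index (PySem.List.pyGetD st.2 month_index [] ++ [name]))
        else st
    | none => st
  else st

def holiday_frequency (holidays : List (List (String × String))) :
    List Int × List String × List String :=
  let st := holidays.foldl hfA_step (List.replicate 12 0, List.replicate 12 [])
  let month_labels := ["Jan", "Feb", "Mar", "Apr", "May", "Jun",
                       "Jul", "Aug", "Sep", "Oct", "Nov", "Dec"]
  let month_tooltips := st.2.map (fun names =>
    if names = [] then "No holidays" else PySem.Str.join ", " names)
  (st.1, month_labels, month_tooltips)

-- ===== PORT B =====
def hfB_parse (h : List (String × String)) : Option (Int × String) :=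
  let d := PySem.Dict.ofList h
  let parts := (PySem.Str.split? (PySem.Dict.getD d "date" "") "-").getD []
  if parts.length < 2 then none
  else
    match PySem.Int.ofStr? (PySem.List.pyGetD parts 1 "") with
    | none => none
    | some v =>
        let mi := v - 1
        if 0 ≤ mi ∧ mi < 12 then
          some (mi, PySem.Dict.getD d "localName" (PySem.Dict.getD d "name" "Unnamed holiday"))
        else none

-- one month's (count, tooltip) cell, from the parsed (month, name) pairs
def hfB_cell (parsed : List (Int × String)) (m : Int) : Int × String :=
  let names := (parsed.filter (fun q => q.1 == m)).map Prod.snd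
  ((names.length : Int), if names = [] then "No holidays" else PySem.Str.join ", " names)

def holiday_frequency_alt (holidays : List (List (String × String))) :
    List Int × List String × List String :=
  let parsed := holidays.filterMap hfB_parse
  let cells := (PySem.List.pyRange 0 12 1).map (hfB_cell parsed)
  (cells.map Prod.fst,
   ["Jan", "Feb", "Mar", "Apr", "May", "Jun", "Jul", "Aug", "Sep", "Oct", "Nov", "Dec"],
   cells.map Prod.snd)

-- ===== PRECONDITION & SPEC =====
def Spec_holiday_frequency (holidays : List (List (String × String))) (out : List Int × List String × List String) : Prop := out = holiday_frequency_alt holidays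
instance (holidays : List (List (String × String))) (out : List Int × List String × List String) : Decidable (Spec_holiday_frequency holidays out) := by unfold Spec_holiday_frequency; infer_instance

-- ===== CLAIM (what is proved, stated in full; the proofs are below) =====
def Claim_equal_holiday_frequency : Prop := ∀ (holidays : List (List (String × String))), Dom_holiday_frequency holidays → Spec_holiday_frequency holidays (holiday_frequency holidays)

-- ===== LEMMAS AND PROOFS =====

-- the update A performs for one successfully parsed holiday
def hfUpd (st : List Int × List (List String)) (q : Int × String) :
    List Int × List (List String) :=
  (PySem.List.pySetD st.1 q.1 (PySem.List.pyGetD st.1 q.1 0 + 1),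
   PySem.List.pySetD st.2 q.1 (PySem.List.pyGetD st.2 q.1 [] ++ [q.2]))

lemma hfA_step_eq (st : List Int × List (List String)) (h : List (String × String)) :
    hfA_step st h = (hfB_parse h).elim st (hfUpd st) := by
  unfold hfA_step hfB_parse
  dsimp only
  generalize ((PySem.Str.split? (PySem.Dict.getD (PySem.Dict.ofList h) "date" "") "-").getD []) = parts
  rcases Nat.lt_or_ge parts.length 2 with hlt | hge
  · rw [if_neg (by omega), if_pos hlt]; rfl
  · rw [if_pos hge, if_neg (by omega)]
    cases PySem.Int.ofStr? (PySem.List.pyGetD parts 1 "") with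
    | none => rfl
    | some v =>
        dsimp only
        by_cases hb : 0 ≤ v - 1 ∧ v - 1 < 12
        · rw [if_pos hb, if_pos hb]; simp [hfUpd]
        · rw [if_neg hb, if_neg hb]; rfl

lemma foldl_step_eq (l : List (List (String × String))) (st : List Int × List (List String)) :
    l.foldl hfA_step st = (l.filterMap hfB_parse).foldl hfUpd st := by
  induction l generalizing st with
  | nil => rfl
  | cons h t ih =>
      simp only [List.foldl_cons, List.filterMap_cons, hfA_step_eq st h]
      cases hp : hfB_parse h <;> simp [ih]

lemma hfB_parse_bounds {h : List (String × String)} {q : Int × String}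
    (hp : hfB_parse h = some q) : 0 ≤ q.1 ∧ q.1 < 12 := by
  unfold hfB_parse at hp
  dsimp only at hp
  set parts := ((PySem.Str.split? (PySem.Dict.getD (PySem.Dict.ofList h) "date" "") "-").getD []) with hpd
  rcases Nat.lt_or_ge parts.length 2 with hlt | hge
  · rw [if_pos hlt] at hp; exact absurd hp (by simp)
  · rw [if_neg (by omega)] at hp
    cases hv : PySem.Int.ofStr? (PySem.List.pyGetD parts 1 "") with
    | none => rw [hv] at hp; exact absurd hp (by simp)
    | some v =>
        rw [hv] at hp
        dsimp only at hp
        by_cases hb : 0 ≤ v - 1 ∧ v - 1 < 12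
        · rw [if_pos hb] at hp
          obtain rfl := Option.some.inj hp
          exact hb
        · rw [if_neg hb] at hp; exact absurd hp (by simp)

lemma foldl_upd_spec (p : List (Int × String)) :
    ∀ st : List Int × List (List String),
    (∀ q ∈ p, 0 ≤ q.1 ∧ q.1 < 12) → st.1.length = 12 → st.2.length = 12 →
    (p.foldl hfUpd st).1.length = 12 ∧ (p.foldl hfUpd st).2.length = 12 ∧
    ∀ m : Nat, m < 12 →
      (p.foldl hfUpd st).1.getD m 0
        = st.1.getD m 0 + (((p.filter (fun q => q.1 == (m : Int))).map Prod.snd).length : Int) ∧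
      (p.foldl hfUpd st).2.getD m []
        = st.2.getD m [] ++ (p.filter (fun q => q.1 == (m : Int))).map Prod.snd := by
  induction p with
  | nil => intro st _ h1 h2; simp [h1, h2]
  | cons q t ih =>
      intro st hb h1 h2
      have hq := hb q List.mem_cons_self
      have hlt1 : q.1 < (st.1.length : Int) := by rw [h1]; exact_mod_cast hq.2
      have hlt2 : q.1 < (st.2.length : Int) := by rw [h2]; exact_mod_cast hq.2
      have hupd1 : (hfUpd st q).1 = st.1.set q.1.toNat (st.1.getD q.1.toNat 0 + 1) := by
        simp only [hfUpd]
        rw [PySem.List.pySetD_of_nonneg _ _ hq.1, PySem.List.pyGetD_eq_getElem _ _ hq.1 hlt1,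
            List.getD_eq_getElem _ _ (by omega)]
      have hupd2 : (hfUpd st q).2 = st.2.set q.1.toNat (st.2.getD q.1.toNat [] ++ [q.2]) := by
        simp only [hfUpd]
        rw [PySem.List.pySetD_of_nonneg _ _ hq.1, PySem.List.pyGetD_eq_getElem _ _ hq.1 hlt2,
            List.getD_eq_getElem _ _ (by omega)]
      have hl1 : (hfUpd st q).1.length = 12 := by simp [hupd1, h1]
      have hl2 : (hfUpd st q).2.length = 12 := by simp [hupd2, h2]
      obtain ⟨j1, j2, jm⟩ := ih (hfUpd st q) (fun r hr => hb r (List.mem_cons_of_mem _ hr)) hl1 hl2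
      refine ⟨by simpa [List.foldl_cons] using j1, by simpa [List.foldl_cons] using j2, ?_⟩
      intro m hm
      obtain ⟨jc, jn⟩ := jm m hm
      have hk1 : q.1.toNat < st.1.length := by omega
      have hk2 : q.1.toNat < st.2.length := by omega
      have hset1 : (hfUpd st q).1.getD m 0
          = if q.1.toNat = m then st.1.getD m 0 + 1 else st.1.getD m 0 := by
        rw [hupd1]
        by_cases he : q.1.toNat = m
        · subst he
          rw [if_pos rfl, List.getD_eq_getElem _ _ (by simpa using hk1), List.getElem_set_self]
        · rw [if_neg he]
          simp [List.getD, List.getElem?_set_ne he]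
      have hset2 : (hfUpd st q).2.getD m []
          = if q.1.toNat = m then st.2.getD m [] ++ [q.2] else st.2.getD m [] := by
        rw [hupd2]
        by_cases he : q.1.toNat = m
        · subst he
          rw [if_pos rfl, List.getD_eq_getElem _ _ (by simpa using hk2), List.getElem_set_self]
        · rw [if_neg he]
          simp [List.getD, List.getElem?_set_ne he]
      have hbeq : (q.1 == (m : Int)) = decide (q.1.toNat = m) := by
        by_cases he : q.1.toNat = m <;> simp [he] <;> omega
      constructor
      · rw [List.foldl_cons, jc, hset1, List.filter_cons, hbeq]
        by_cases he : q.1.toNat = m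
        · rw [if_pos he, if_pos (by simp [he])]
          simp only [List.map_cons, List.length_cons]
          push_cast; ring
        · rw [if_neg he, if_neg (by simp [he])]
      · rw [List.foldl_cons, jn, hset2, List.filter_cons, hbeq]
        by_cases he : q.1.toNat = m
        · rw [if_pos he, if_pos (by simp [he])]
          simp [List.append_assoc]
        · rw [if_neg he, if_neg (by simp [he])]

lemma pyRange12 : PySem.List.pyRange 0 12 1 = [0, 1, 2, 3, 4, 5, 6, 7, 8, 9, 10, 11] := by decide

lemma pyRange12_getElem (m : Nat) (hm : m < 12) (h' : m < (PySem.List.pyRange 0 12 1).length) :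
    (PySem.List.pyRange 0 12 1)[m] = (m : Int) := by
  rw [List.getElem_of_eq pyRange12]
  have hm' : m < ([0, 1, 2, 3, 4, 5, 6, 7, 8, 9, 10, 11] : List Int).length := by simp; omega
  interval_cases m <;> rfl

-- ===== VERDICT (by name: the statement is the Claim_ definition above) =====
theorem holiday_frequency_spec : Claim_equal_holiday_frequency := by
  intro holidays _
  unfold Spec_holiday_frequency holiday_frequency holiday_frequency_alt
  dsimp only
  rw [foldl_step_eq]
  set p := holidays.filterMap hfB_parse with hp
  have hb : ∀ q ∈ p, 0 ≤ q.1 ∧ q.1 < 12 := by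
    intro q hq
    rw [hp, List.mem_filterMap] at hq
    obtain ⟨h, _, hparse⟩ := hq
    exact hfB_parse_bounds hparse
  obtain ⟨l1, l2, hm⟩ := foldl_upd_spec p (List.replicate 12 0, List.replicate 12 [])
      hb (by simp) (by simp)
  set st := p.foldl hfUpd (List.replicate 12 0, List.replicate 12 []) with hst
  refine Prod.ext ?_ (Prod.ext rfl ?_)
  · rw [List.map_map]
    apply List.ext_getElem (by simp [l1, pyRange12])
    intro m h1 h2
    have hm12 : m < 12 := by simpa [l1] using h1
    have hv := (hm m hm12).1
    rw [List.getD_eq_getElem _ _ h1] at hv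
    dsimp only at hv
    have hrep : (List.replicate 12 (0 : Int)).getD m 0 = 0 := by
      rw [List.getD_eq_getElem _ _ (by simpa using hm12)]; apply List.getElem_replicate
    rw [hrep, zero_add] at hv
    simp only [List.getElem_map]
    rw [pyRange12_getElem m hm12, hv]
    simp [hfB_cell]
  · rw [List.map_map]
    apply List.ext_getElem (by simp [l2, pyRange12])
    intro m h1 h2
    have hm12 : m < 12 := by simpa [l2] using h1
    have hv := (hm m hm12).2
    rw [List.getD_eq_getElem _ _ (by simpa [l2] using hm12)] at hv
    dsimp only at hv
    have hrep : (List.replicate 12 ([] : List String)).getD m [] = [] := by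
      rw [List.getD_eq_getElem _ _ (by simpa using hm12)]; apply List.getElem_replicate
    rw [hrep, List.nil_append] at hv
    simp only [List.getElem_map]
    rw [pyRange12_getElem m hm12, hv]
    simp [hfB_cell]
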